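-- pv_equiv track=rewrite | github.com/yuzhecd/al_py | Array_py/max_num.py | num_max
-- ===== SOURCE A (Python) =====
-- def num_max(n):
--     max = mid = 0
--     for i in n:
--         if i > max:
--             mid = max
--             max = i
--         elif i > mid:
--             mid = i
--     if ((max // mid) >= 2):
--         return True
--     else:
--         return False
-- ===== SOURCE B (Python) =====
-- def num_max(n):
--     s = sorted(n)
--     return s[-1] // s[-2] >= 2
-- ===== Notes on version B (the rewrite author's own statement) =====
-- stated objective: simpler
-- what changed: Replaces the running top-two tracking loop (max/mid state machine with ordered branches) by sorting the list and reading the largest and second-largest off the last two positions.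
import Mathlib
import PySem

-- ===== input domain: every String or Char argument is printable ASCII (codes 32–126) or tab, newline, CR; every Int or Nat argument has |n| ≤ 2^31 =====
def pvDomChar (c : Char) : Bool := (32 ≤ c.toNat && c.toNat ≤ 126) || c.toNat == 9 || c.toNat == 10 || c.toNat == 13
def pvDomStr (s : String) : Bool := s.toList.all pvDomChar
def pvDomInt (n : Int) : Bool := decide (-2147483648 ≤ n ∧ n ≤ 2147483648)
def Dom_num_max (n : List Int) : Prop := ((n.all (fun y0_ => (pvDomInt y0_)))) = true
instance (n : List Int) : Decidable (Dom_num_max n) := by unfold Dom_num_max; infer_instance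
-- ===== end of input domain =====

-- B sorts instead of tracking a running (max, mid) pair; return value only, neither side mutates its argument.

-- ===== PORT A =====
def num_max (n : List Int) : Bool :=
  let p := n.foldl (fun (s : Int × Int) i =>
    if i > s.1 then (i, s.1) else if i > s.2 then (s.1, i) else s) (0, 0)
  decide (2 ≤ PySem.Int.floordiv p.1 p.2)

-- ===== PORT B =====
def num_max_alt (n : List Int) : Bool :=
  let s := PySem.List.sorted n (fun x => x) false
  match PySem.List.pyGet? s (-1), PySem.List.pyGet? s (-2) with
  | some mx, some md => decide (2 ≤ PySem.Int.floordiv mx md)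
  | _, _ => false

-- ===== PRECONDITION & SPEC =====
-- Pre_ excludes exactly the inputs with fewer than two positive elements: there A's `mid`
-- stays at its 0 sentinel and `max // mid` raises ZeroDivisionError (A returns nowhere outside Pre_).
def Pre_num_max (n : List Int) : Prop := 2 ≤ n.countP (fun i => decide (0 < i))
instance (n : List Int) : Decidable (Pre_num_max n) := by unfold Pre_num_max; infer_instance
def pvWitness_num_max : List Int := [7, 3]

def Spec_num_max (n : List Int) (out : Bool) : Prop := out = num_max_alt n
instance (n : List Int) (out : Bool) : Decidable (Spec_num_max n out) := by unfold Spec_num_max; infer_instance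

-- ===== CLAIM (what is proved, stated in full; the proofs are below) =====
def Claim_equal_num_max : Prop := ∀ (n : List Int), Dom_num_max n → Pre_num_max n → Spec_num_max n (num_max n)

-- ===== LEMMAS AND PROOFS =====

-- the max/min normal form of one step of A's loop
def pvOp (p : Int × Int) (i : Int) : Int × Int := (max p.1 i, max p.2 (min p.1 i))

lemma pvStep_eq_op (a b i : Int) (h : b ≤ a) :
    (if i > a then (i, a) else if i > b then (a, i) else (a, b)) = pvOp (a, b) i := by
  unfold pvOp; split_ifs <;> simp [Prod.ext_iff] <;> omega

lemma pvFoldl_step_eq_op (l : List Int) : ∀ a b : Int, b ≤ a →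
    l.foldl (fun (s : Int × Int) i =>
      if i > s.1 then (i, s.1) else if i > s.2 then (s.1, i) else s) (a, b)
      = l.foldl pvOp (a, b) := by
  induction l with
  | nil => intro a b _; rfl
  | cons x t ih =>
    intro a b h
    simp only [List.foldl_cons]
    rw [pvStep_eq_op a b x h]
    have h2 : max b (min a x) ≤ max a x := by omega
    have := ih (max a x) (max b (min a x)) h2
    simpa [pvOp] using this

lemma pvOp_rightComm (p : Int × Int) (i j : Int) : pvOp (pvOp p i) j = pvOp (pvOp p j) i := by
  simp [pvOp, Prod.ext_iff]; omega

lemma pvFoldl_op_last2 (t : List Int) : ∀ (y x a b : Int),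
    (t ++ [y, x]).Pairwise (· ≤ ·) →
    (t ++ [y, x]).foldl pvOp (a, b) = (max a x, max (max b (min a x)) y) := by
  induction t with
  | nil =>
    intro y x a b hp
    have hyx : y ≤ x := by simpa using hp
    simp [pvOp, Prod.ext_iff]; omega
  | cons z t ih =>
    intro y x a b hp
    have hz : ∀ w ∈ t ++ [y, x], z ≤ w := (List.pairwise_cons.mp hp).1
    have hzy : z ≤ y := hz y (by simp)
    have hzx : z ≤ x := hz x (by simp)
    have hp' : (t ++ [y, x]).Pairwise (· ≤ ·) := (List.pairwise_cons.mp hp).2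
    have := ih y x (max a z) (max b (min a z)) hp'
    simp only [List.cons_append, List.foldl_cons]
    rw [show pvOp (a, b) z = (max a z, max b (min a z)) from rfl, this]
    simp [Prod.ext_iff]; omega

lemma pvCountP_pos (t : List Int) (y x : Int)
    (hp : (t ++ [y, x]).Pairwise (· ≤ ·))
    (hc : 2 ≤ (t ++ [y, x]).countP (fun i => decide (0 < i))) :
    0 < y ∧ 0 < x := by
  have hyx : y ≤ x := by
    have := (List.pairwise_append.mp hp).2.1
    simpa using this
  by_cases hy : 0 < y
  · exact ⟨hy, lt_of_lt_of_le hy hyx⟩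
  · exfalso
    have hty : ∀ w ∈ t, w ≤ y := by
      intro w hw
      exact (List.pairwise_append.mp hp).2.2 w hw y (by simp)
    have hct : t.countP (fun i => decide (0 < i)) = 0 := by
      rw [List.countP_eq_zero]
      intro w hw
      simpa using not_lt.mpr (le_trans (hty w hw) (not_lt.mp hy))
    rw [List.countP_append, hct] at hc
    simp only [List.countP_cons, List.countP_nil] at hc
    by_cases hx : 0 < x <;> simp [hy, hx] at hc

-- ===== VERDICT (by name: the statement is the Claim_ definition above) =====
theorem num_max_spec : Claim_equal_num_max := by
  intro n _ hpre
  unfold Pre_num_max at hpre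
  unfold Spec_num_max num_max num_max_alt
  have hperm : (PySem.List.sorted n (fun x => x) false).Perm n :=
    PySem.List.sorted_perm n (fun x => x) false
  generalize hs : PySem.List.sorted n (fun x => x) false = s at hperm
  have hcs : 2 ≤ s.countP (fun i => decide (0 < i)) := by
    rw [hperm.countP_eq]; exact hpre
  have hlen : 2 ≤ s.length := le_trans hcs List.countP_le_length
  -- decompose s as t ++ [y, x]
  obtain ⟨t, y, x, hdec⟩ : ∃ t y x, s = t ++ [y, x] := by
    match hrev : s.reverse with
    | [] =>
      have : s.length = 0 := by rw [← List.length_reverse, hrev]; rfl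
      omega
    | [w] =>
      have : s.length = 1 := by rw [← List.length_reverse, hrev]; rfl
      omega
    | x :: y :: r =>
      refine ⟨r.reverse, y, x, ?_⟩
      have := congrArg List.reverse hrev
      simpa using this
  have hpair : s.Pairwise (· ≤ ·) := by
    rw [← hs]; exact PySem.List.sorted_pairwise n (fun x => x)
  have hpos : 0 < y ∧ 0 < x := pvCountP_pos t y x (hdec ▸ hpair) (hdec ▸ hcs)
  -- A's loop value
  have hA : n.foldl (fun (s : Int × Int) i =>
      if i > s.1 then (i, s.1) else if i > s.2 then (s.1, i) else s) (0, 0) = (x, y) := by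
    rw [pvFoldl_step_eq_op n 0 0 le_rfl]
    rw [@List.Perm.foldl_eq _ _ pvOp _ _ ⟨fun p a b => pvOp_rightComm p a b⟩ hperm.symm (0, 0)]
    rw [hdec, pvFoldl_op_last2 t y x 0 0 (hdec ▸ hpair)]
    simp [Prod.ext_iff]; omega
  -- B's two indexings
  have hB1 : PySem.List.pyGet? s (-1) = some x := by
    rw [hdec, show t ++ [y, x] = (t ++ [y]) ++ [x] by simp]
    exact PySem.List.pyGet?_neg_one_append_singleton (t ++ [y]) x
  have hB2 : PySem.List.pyGet? s (-2) = some y := by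
    rw [PySem.List.pyGet?_neg_ofNat s 2 (by omega) (by omega)]
    rw [hdec]
    have hl : (t ++ [y, x]).length - 2 = t.length := by simp
    rw [hl, List.getElem?_append_right le_rfl]
    simp
  simp only [hA, hB1, hB2]
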